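-- pv_equiv track=rewrite | github.com/tonyjosephsebastians/AI-Design-patterns | two_pointers_examples.py | _normalize_triplets
-- ===== SOURCE A (Python) =====
-- def _normalize_triplets(triplets: set[tuple[int, int, int]] | list[list[int]]) -> list[list[int]]:
--     """Normalize 3Sum output:
--     1) each triplet sorted ascending,
--     2) no duplicates,
--     3) full list sorted lexicographically.
--     """
--     normalized_set: set[tuple[int, int, int]] = set()
--
--     if isinstance(triplets, set):
--         for triplet in triplets:
--             normalized_set.add(tuple(sorted(triplet)))
--     else:
--         for triplet in triplets:
--             normalized_set.add(tuple(sorted(triplet)))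
--
--     return [list(t) for t in sorted(normalized_set)]
-- ===== SOURCE B (Python) =====
-- def _normalize_triplets(triplets):
--     """Sort each triplet, sort the whole list, then drop duplicates by adjacency."""
--     ts = sorted([sorted(t) for t in triplets])
--     out = []
--     prev = None
--     for t in ts:
--         if prev != t:
--             out.append(t)
--             prev = t
--     return out
-- ===== Notes on version B (the rewrite author's own statement) =====
-- stated objective: alternative
-- what changed: B sorts the list of per-triplet-sorted triplets first and then removes duplicates in one linear adjacent-neighbor pass with a prev variable, instead of A's dedupe-into-a-set followed by sorting the set.
import Mathlib
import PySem

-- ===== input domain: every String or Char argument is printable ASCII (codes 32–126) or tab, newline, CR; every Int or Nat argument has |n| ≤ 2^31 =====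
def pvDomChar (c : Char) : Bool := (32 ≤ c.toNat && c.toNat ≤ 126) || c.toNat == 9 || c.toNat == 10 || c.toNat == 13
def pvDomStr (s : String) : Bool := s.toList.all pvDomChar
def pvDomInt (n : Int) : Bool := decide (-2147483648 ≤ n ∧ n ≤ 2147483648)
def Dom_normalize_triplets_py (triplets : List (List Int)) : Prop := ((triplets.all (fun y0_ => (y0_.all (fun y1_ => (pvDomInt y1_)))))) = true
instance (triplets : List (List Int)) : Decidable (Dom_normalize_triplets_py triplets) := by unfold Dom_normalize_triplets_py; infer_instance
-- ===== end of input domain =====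

-- B replaces A's dedupe-into-a-set-then-sort by sort-first then a single adjacent-neighbor dedup pass (alternative decomposition, same cost).


-- ===== PORT A =====
-- Under the type convention the argument is a List, so Python's isinstance(triplets, set)
-- branch is dead code; both branches of A run the identical loop body, ported once.
def normalize_triplets_py (triplets : List (List Int)) : List (List Int) :=
  let normalized_set : PySem.Set (List Int) :=
    triplets.foldl (fun s t => PySem.Set.add s (PySem.List.sorted t (fun x => x) false)) PySem.Set.empty
  PySem.List.sorted normalized_set (fun x => x) false

-- ===== PORT B =====
-- ts = sorted list of per-triplet-sorted triplets; then one pass keeping t only when prev ≠ t.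
def normalize_triplets_py_alt (triplets : List (List Int)) : List (List Int) :=
  let ts := PySem.List.sorted (triplets.map (fun t => PySem.List.sorted t (fun x => x) false)) (fun x => x) false
  (ts.foldl (fun (st : List (List Int) × Option (List Int)) t =>
      if st.2 ≠ some t then (st.1 ++ [t], some t) else st) ([], none)).1

-- ===== PRECONDITION & SPEC =====
def Spec_normalize_triplets_py (triplets : List (List Int)) (out : List (List Int)) : Prop := out = normalize_triplets_py_alt triplets
instance (triplets : List (List Int)) (out : List (List Int)) : Decidable (Spec_normalize_triplets_py triplets out) := by unfold Spec_normalize_triplets_py; infer_instance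

-- ===== CLAIM (what is proved, stated in full; the proofs are below) =====
def Claim_equal_normalize_triplets_py : Prop := ∀ (triplets : List (List Int)), Dom_normalize_triplets_py triplets → Spec_normalize_triplets_py triplets (normalize_triplets_py triplets)

-- ===== LEMMAS AND PROOFS =====

-- The two LT/DecidableLT instance pairs on List Int name the same lexicographic order.
theorem sorted_bridge (ms : List (List Int)) (key : List Int → List Int) (rev : Bool) :
    @PySem.List.sorted (List Int) (List Int) List.instLT (fun a b => a.decidableLT b) ms key rev
      = @PySem.List.sorted (List Int) (List Int) List.instLinearOrder.toLT LinearOrder.toDecidableLT ms key rev := by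
  congr 1

-- Functional description of B's adjacent-dedup loop: `p` is the `prev` variable.
def dedFrom {α : Type} [DecidableEq α] (p : Option α) : List α → List α
  | [] => []
  | x :: rest => if p ≠ some x then x :: dedFrom (some x) rest else dedFrom p rest

theorem foldl_eq_dedFrom {α : Type} [DecidableEq α] (zs : List α) (acc : List α) (p : Option α) :
    (zs.foldl (fun (st : List α × Option α) t =>
      if st.2 ≠ some t then (st.1 ++ [t], some t) else st) (acc, p)).1 = acc ++ dedFrom p zs := by
  induction zs generalizing acc p with
  | nil => simp [dedFrom]
  | cons x rest ih =>
    rw [List.foldl_cons]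
    by_cases h : p = some x
    · rw [if_neg (by simp [h]), ih]
      simp [dedFrom, h]
    · rw [if_pos (by simp [h]), ih]
      simp [dedFrom, h]

theorem dedFrom_subset {α : Type} [DecidableEq α] (p : Option α) (zs : List α) :
    ∀ x ∈ dedFrom p zs, x ∈ zs := by
  induction zs generalizing p with
  | nil => simp [dedFrom]
  | cons z rest ih =>
    intro x hx
    by_cases h : p = some z
    · subst h
      simp only [dedFrom, ne_eq, not_true_eq_false, if_false] at hx
      exact List.mem_cons_of_mem _ (ih (some z) x (by simpa [dedFrom] using hx))
    · simp only [dedFrom, ne_eq, h, not_false_iff, if_pos, List.mem_cons] at hx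
      rcases hx with rfl | hx
      · exact List.mem_cons_self ..
      · exact List.mem_cons_of_mem _ (ih (some z) x hx)

theorem mem_dedFrom {α : Type} [DecidableEq α] (p : Option α) (zs : List α) :
    ∀ x ∈ zs, x ∈ dedFrom p zs ∨ p = some x := by
  induction zs generalizing p with
  | nil => simp
  | cons z rest ih =>
    intro x hx
    rcases List.mem_cons.mp hx with rfl | hx
    · by_cases h : p = some x
      · exact Or.inr h
      · exact Or.inl (by simp [dedFrom, h])
    · by_cases h : p = some z
      · subst h
        rcases ih (some z) x hx with h' | h'
        · exact Or.inl (by simp [dedFrom]; exact h')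
        · exact Or.inr h'
      · rcases ih (some z) x hx with h' | h'
        · exact Or.inl (by simp [dedFrom, h]; exact Or.inr h')
        · exact Or.inl (by simp [dedFrom, h]; exact Or.inl (Option.some.inj h'.symm))

theorem dedFrom_pairwise {α : Type} [LinearOrder α] [DecidableEq α] (zs : List α) :
    ∀ (p : Option α), zs.Pairwise (fun a b => a ≤ b) →
      (∀ a, p = some a → ∀ y ∈ zs, a ≤ y) →
      (dedFrom p zs).Pairwise (fun a b => a < b) ∧ (∀ a, p = some a → ∀ y ∈ dedFrom p zs, a < y) := by
  induction zs with
  | nil => intro p _ _; exact ⟨List.Pairwise.nil, by simp [dedFrom]⟩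
  | cons z rest ih =>
    intro p hpw hp
    have hz : ∀ y ∈ rest, z ≤ y := fun y hy => (List.pairwise_cons.mp hpw).1 y hy
    have hrest : rest.Pairwise (fun a b => a ≤ b) := (List.pairwise_cons.mp hpw).2
    by_cases h : p = some z
    · subst h
      have ih' := ih (some z) hrest (by rintro a ha y hy; cases ha; exact hz y hy)
      refine ⟨by simpa [dedFrom] using ih'.1, ?_⟩
      rintro a ha y hy
      have haz := Option.some.inj ha
      subst haz
      simp only [dedFrom, ne_eq, not_true_eq_false, if_false] at hy
      exact ih'.2 z rfl y (by simpa [dedFrom] using hy)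
    · have ih' := ih (some z) hrest (by rintro a ha y hy; cases ha; exact hz y hy)
      have hzlt : ∀ y ∈ dedFrom (some z) rest, z < y := ih'.2 z rfl
      constructor
      · simp only [dedFrom, ne_eq, h, not_false_iff, if_pos]
        exact List.pairwise_cons.mpr ⟨hzlt, ih'.1⟩
      · rintro a ha y hy
        cases ha
        simp only [dedFrom, ne_eq, h, not_false_iff, if_pos, List.mem_cons] at hy
        have haz : a ≤ z := hp a rfl z (List.mem_cons_self ..)
        have haz' : a < z := lt_of_le_of_ne haz (fun e => h (by rw [e]))
        rcases hy with rfl | hy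
        · exact haz'
        · exact lt_trans haz' (hzlt y hy)

-- ===== VERDICT (by name: the statement is the Claim_ definition above) =====
theorem normalize_triplets_py_spec : Claim_equal_normalize_triplets_py := by
  intro triplets _
  unfold Spec_normalize_triplets_py normalize_triplets_py normalize_triplets_py_alt
  set ms := triplets.map (fun t => PySem.List.sorted t (fun x => x) false) with hms
  have hA : triplets.foldl (fun s t => PySem.Set.add s (PySem.List.sorted t (fun x => x) false)) PySem.Set.empty
      = PySem.Set.ofList ms := by
    rw [hms, PySem.Set.ofList_eq_foldl, List.foldl_map]; rfl
  show PySem.List.sorted _ (fun x => x) false = _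
  rw [hA, foldl_eq_dedFrom, List.nil_append, sorted_bridge (PySem.Set.ofList ms)]
  have hsorted : List.Pairwise (fun a b : List Int => a ≤ b) (PySem.List.sorted ms (fun x => x) false) := by
    rw [sorted_bridge]
    exact @PySem.List.sorted_pairwise (List Int) (List Int) List.instLinearOrder ms (fun x => x)
  have hded := dedFrom_pairwise (PySem.List.sorted ms (fun x => x) false) none hsorted (by simp)
  have hlt := hded.1
  have hnodup : (dedFrom none (PySem.List.sorted ms (fun x => x) false)).Nodup :=
    hlt.imp (fun h => ne_of_lt h)
  have hmem : ∀ x, x ∈ dedFrom none (PySem.List.sorted ms (fun x => x) false) ↔ x ∈ PySem.Set.ofList ms := by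
    intro x
    rw [PySem.Set.mem_ofList]
    constructor
    · intro hx
      exact (PySem.List.mem_sorted ms (fun x => x) false x).mp (dedFrom_subset none _ x hx)
    · intro hx
      rcases mem_dedFrom none (PySem.List.sorted ms (fun x => x) false) x
        ((PySem.List.mem_sorted ms (fun x => x) false x).mpr hx) with h | h
      · exact h
      · exact absurd h (by simp)
  have hperm : (dedFrom none (PySem.List.sorted ms (fun x => x) false)).Perm (PySem.Set.ofList ms) :=
    (List.perm_ext_iff_of_nodup hnodup (PySem.Set.nodup_ofList ms)).mpr hmem
  exact @PySem.List.sorted_eq_of_perm_of_pairwise_lt (List Int) (List Int) List.instLinearOrder (PySem.Set.ofList ms) _ (fun x => x) hperm hlt
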